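-- pv_equiv track=rewrite | github.com/shoark7/algorithm-with-python | problems_solving/algospot/tripathcnt.py | path_count
-- ===== SOURCE A (Python) =====
-- def path_count(tri):
--     length = len(tri)
--     cache = [[-1 for _ in range(length)] for _ in range(length)]
--     count_cache = [[-1 for _ in range(length)] for _ in range(length)]
--
--     def find(y, x):
--         if y == length - 1:
--             return tri[y][x]
--         elif cache[y][x] != -1:
--             return cache[y][x]
--         else:
--             cache[y][x] = max(find(y+1, x), find(y+1, x+1)) + tri[y][x]
--             return cache[y][x]
--
--     def count(y, x):
--         if y == length - 1:
--             return 1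
--         elif count_cache[y][x] != -1:
--             return count_cache[y][x]
--         else:
--             ret = 0
--             if find(y+1, x+1) >= find(y+1, x):
--                 ret += count(y+1, x+1)
--             if find(y+1, x+1) <= find(y+1, x):
--                 ret += count(y+1, x)
--             count_cache[y][x] = ret
--             return ret
--     return count(0, 0)
-- ===== SOURCE B (Python) =====
-- def path_count(tri):
--     best = list(tri[-1])
--     cnt = [1] * len(best)
--     for y in range(len(tri) - 2, -1, -1):
--         row = tri[y]
--         nbest = [row[x] + max(best[x], best[x + 1]) for x in range(y + 1)]
--         ncnt = [(cnt[x] if best[x] >= best[x + 1] else 0) +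
--                 (cnt[x + 1] if best[x + 1] >= best[x] else 0)
--                 for x in range(y + 1)]
--         best, cnt = nbest, ncnt
--     return cnt[0]
-- ===== Notes on version B (the rewrite author's own statement) =====
-- stated objective: alternative
-- what changed: Replaced the top-down memoized recursion (find/count with two cache tables) by an iterative bottom-up DP that sweeps the rows from the bottom keeping only the current best-sum and count arrays.
-- outside the precondition, e.g. on path_count([[]]): A returns 1, B raises IndexError; on path_count([[], [1, 2]]): A returns 1, B raises IndexError
import Mathlib
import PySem

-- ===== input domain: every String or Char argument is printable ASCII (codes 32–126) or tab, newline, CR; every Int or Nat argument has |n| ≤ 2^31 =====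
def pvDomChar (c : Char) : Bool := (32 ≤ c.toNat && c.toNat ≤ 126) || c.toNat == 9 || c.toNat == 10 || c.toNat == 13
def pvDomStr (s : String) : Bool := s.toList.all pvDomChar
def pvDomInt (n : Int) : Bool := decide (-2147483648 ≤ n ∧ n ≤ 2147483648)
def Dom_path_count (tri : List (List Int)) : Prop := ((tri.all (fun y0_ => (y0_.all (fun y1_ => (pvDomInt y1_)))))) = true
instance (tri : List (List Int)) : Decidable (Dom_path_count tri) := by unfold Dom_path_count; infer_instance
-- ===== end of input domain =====

-- B replaces A's top-down memoized recursion by an iterative bottom-up DP sweep (alternative decomposition, same O(n^2) cost).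


-- ===== PORT A =====
-- tri[y][x]: under Pre_path_count every access is with in-range non-negative indices, so getD is exact there.
def pvGetE (tri : List (List Int)) (y x : Nat) : Int := (tri.getD y []).getD x 0

-- A's `find`, ported without its memo table: the cache only stores values the same pure recursion
-- produces, so every returned value is identical.  The `len ≤ y + 1` disjunct is a totality guard
-- only (on A's call tree y ≤ len - 1 always, so it never changes a value A computes).
def pvFindA (tri : List (List Int)) (len y x : Nat) : Int :=
  if _h : y = len - 1 ∨ len ≤ y + 1 then pvGetE tri y x
  else pvGetE tri y x + max (pvFindA tri len (y + 1) x) (pvFindA tri len (y + 1) (x + 1))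
termination_by len - y
decreasing_by all_goals (simp only [not_or] at _h; omega)

-- A's `count`, ported without its memo table (same remark as for `find`).
def pvCountA (tri : List (List Int)) (len y x : Nat) : Int :=
  if _h : y = len - 1 ∨ len ≤ y + 1 then 1
  else
    (if pvFindA tri len (y + 1) x ≤ pvFindA tri len (y + 1) (x + 1) then
        pvCountA tri len (y + 1) (x + 1) else 0) +
    (if pvFindA tri len (y + 1) (x + 1) ≤ pvFindA tri len (y + 1) x then
        pvCountA tri len (y + 1) x else 0)
termination_by len - y
decreasing_by all_goals (simp only [not_or] at _h; omega)

def path_count (tri : List (List Int)) : Int := pvCountA tri tri.length 0 0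

-- ===== PORT B =====
-- one iteration of B's loop body for row y: build the new best / cnt lists by comprehension
def pvRowStep (tri : List (List Int)) (y : Nat) (best cnt : List Int) : List Int × List Int :=
  let row := tri.getD y []
  ((List.range (y + 1)).map fun x => row.getD x 0 + max (best.getD x 0) (best.getD (x + 1) 0),
   (List.range (y + 1)).map fun x =>
     (if best.getD (x + 1) 0 ≤ best.getD x 0 then cnt.getD x 0 else 0) +
     (if best.getD x 0 ≤ best.getD (x + 1) 0 then cnt.getD (x + 1) 0 else 0))

-- B's `for y in range(len(tri)-2, -1, -1)` loop, counting the remaining iterations down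
def pvLoopB (tri : List (List Int)) : Nat → List Int × List Int → List Int × List Int
  | 0, bc => bc
  | k + 1, bc => pvLoopB tri k (pvRowStep tri k bc.1 bc.2)

def path_count_alt (tri : List (List Int)) : Int :=
  let len := tri.length
  let best0 := tri.getD (len - 1) []           -- list(tri[-1]); in range since Pre_ gives tri ≠ []
  let cnt0 : List Int := List.replicate best0.length 1
  ((pvLoopB tri (len - 1) (best0, cnt0)).2).getD 0 0

-- ===== PRECONDITION & SPEC =====
-- Pre_ admits exactly the well-shaped non-empty triangles (row i has at least i+1 entries).  Outside
-- it A raises IndexError, except on degenerate inputs whose rows past the first are well-shaped but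
-- whose first row(s) are too short: there A returns 1 without ever reading those rows, while B's
-- direct indexing raises IndexError — those accidental returns are excluded rather than matched.
def Pre_path_count (tri : List (List Int)) : Prop :=
  tri ≠ [] ∧ ∀ i ∈ List.range tri.length, i < (tri.getD i []).length
instance (tri : List (List Int)) : Decidable (Pre_path_count tri) := by
  unfold Pre_path_count; infer_instance

def pvWitness_path_count : List (List Int) := [[1], [2, 3], [4, 5, 6]]

def Spec_path_count (tri : List (List Int)) (out : Int) : Prop := out = path_count_alt tri
instance (tri : List (List Int)) (out : Int) : Decidable (Spec_path_count tri out) := by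
  unfold Spec_path_count; infer_instance

-- ===== CLAIM (what is proved, stated in full; the proofs are below) =====
def Claim_equal_path_count : Prop :=
  ∀ (tri : List (List Int)), Dom_path_count tri → Pre_path_count tri →
    Spec_path_count tri (path_count tri)

-- ===== LEMMAS AND PROOFS =====
theorem pv_getD_map_range {f : Nat → Int} {k x : Nat} (h : x < k) :
    (((List.range k).map f).getD x 0) = f x := by
  simp [List.getD, h]

theorem pvFindA_base (tri : List (List Int)) (len y x : Nat)
    (h : y = len - 1 ∨ len ≤ y + 1) : pvFindA tri len y x = pvGetE tri y x := by
  rw [pvFindA]; simp [h]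

theorem pvFindA_step (tri : List (List Int)) (len y x : Nat)
    (h : ¬(y = len - 1 ∨ len ≤ y + 1)) :
    pvFindA tri len y x =
      pvGetE tri y x + max (pvFindA tri len (y + 1) x) (pvFindA tri len (y + 1) (x + 1)) := by
  rw [pvFindA]; simp [h]

theorem pvCountA_base (tri : List (List Int)) (len y x : Nat)
    (h : y = len - 1 ∨ len ≤ y + 1) : pvCountA tri len y x = 1 := by
  rw [pvCountA]; simp [h]

theorem pvCountA_step (tri : List (List Int)) (len y x : Nat)
    (h : ¬(y = len - 1 ∨ len ≤ y + 1)) :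
    pvCountA tri len y x =
      (if pvFindA tri len (y + 1) x ≤ pvFindA tri len (y + 1) (x + 1) then
          pvCountA tri len (y + 1) (x + 1) else 0) +
      (if pvFindA tri len (y + 1) (x + 1) ≤ pvFindA tri len (y + 1) x then
          pvCountA tri len (y + 1) x else 0) := by
  rw [pvCountA]; simp [h]

-- the loop invariant: if (best, cnt) tabulate pvFindA / pvCountA at row k (indices 0..k),
-- then running the remaining k iterations yields pvCountA at the apex.
theorem pv_loop_inv (tri : List (List Int)) (len : Nat) :
    ∀ (k : Nat) (best cnt : List Int), k < len →
      (∀ x, x ≤ k → best.getD x 0 = pvFindA tri len k x) →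
      (∀ x, x ≤ k → cnt.getD x 0 = pvCountA tri len k x) →
      ((pvLoopB tri k (best, cnt)).2).getD 0 0 = pvCountA tri len 0 0 := by
  intro k
  induction k with
  | zero =>
    intro best cnt _ _ hc
    simpa [pvLoopB] using hc 0 (Nat.le_refl 0)
  | succ k ih =>
    intro best cnt hk hb hc
    have hklen : k < len := Nat.lt_of_succ_lt hk
    have hguard : ¬ (k = len - 1 ∨ len ≤ k + 1) := by omega
    show ((pvLoopB tri k (pvRowStep tri k best cnt)).2).getD 0 0 = pvCountA tri len 0 0
    apply ih _ _ hklen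
    · intro x hx
      have hx' : x < k + 1 := Nat.lt_succ_of_le hx
      simp only [pv_getD_map_range hx']
      rw [pvFindA_step _ _ _ _ hguard, hb x (by omega), hb (x + 1) (by omega)]
      simp [pvGetE]
    · intro x hx
      have hx' : x < k + 1 := Nat.lt_succ_of_le hx
      simp only [pv_getD_map_range hx']
      rw [pvCountA_step _ _ _ _ hguard, hb x (by omega), hb (x + 1) (by omega),
        hc x (by omega), hc (x + 1) (by omega)]
      apply add_comm

-- ===== VERDICT (by name: the statement is the Claim_ definition above) =====
theorem path_count_spec : Claim_equal_path_count := by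
  intro tri _hdom hpre
  obtain ⟨hne, hrows⟩ := hpre
  have hlen : 0 < tri.length := List.length_pos_iff.mpr hne
  show path_count tri = path_count_alt tri
  simp only [path_count, path_count_alt]
  rw [pv_loop_inv tri tri.length (tri.length - 1) _ _ (by omega)]
  · intro x hx
    rw [pvFindA_base _ _ _ _ (Or.inl rfl)]
    rfl
  · intro x hx
    have hrow := hrows (tri.length - 1) (by simp [List.mem_range]; omega)
    rw [pvCountA_base _ _ _ _ (Or.inl rfl)]
    simp only [List.getD] at hrow ⊢
    have hx2 : x < (tri[tri.length - 1]?.getD []).length := by omega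
    simp [hx2]
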